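-- pv_equiv track=rewrite | github.com/DanilGoose/tic-tac-toe-iti | game/board.py | _get_line_info
-- ===== SOURCE A (Python) =====
-- from typing import Optional, List, Tuple, Set
--
-- def _get_line_info(cells: List[Tuple[int, int]]) -> Optional[Tuple[int, int, int]]:
--     if len(cells) < 2:
--         return None
--     xs = [x for x, _ in cells]
--     ys = [y for _, y in cells]
--     length = len(cells)
--     if all(y == ys[0] for y in ys):
--         xs_sorted = sorted(set(xs))
--         if len(xs_sorted) == length and xs_sorted == list(range(xs_sorted[0], xs_sorted[0] + length)):
--             return (1, 0, length)
--     if all(x == xs[0] for x in xs):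
--         ys_sorted = sorted(set(ys))
--         if len(ys_sorted) == length and ys_sorted == list(range(ys_sorted[0], ys_sorted[0] + length)):
--             return (0, 1, length)
--     if all((x - y) == (xs[0] - ys[0]) for x, y in cells):
--         points = sorted(cells, key=lambda p: p[0])
--         if all(points[i + 1][0] - points[i][0] == 1 and points[i + 1][1] - points[i][1] == 1 for i in range(length - 1)):
--             return (1, 1, length)
--     if all((x + y) == (xs[0] + ys[0]) for x, y in cells):
--         points = sorted(cells, key=lambda p: p[0])
--         if all(points[i + 1][0] - points[i][0] == 1 and points[i + 1][1] - points[i][1] == -1 for i in range(length - 1)):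
--             return (1, -1, length)
--     return None
-- ===== SOURCE B (Python) =====
-- from typing import Optional, List, Tuple
--
-- _DIRS = {(1, 0), (0, 1), (1, 1), (1, -1)}
--
-- def _get_line_info(cells: List[Tuple[int, int]]) -> Optional[Tuple[int, int, int]]:
--     if len(cells) < 2:
--         return None
--     pts = sorted(cells)
--     dx = pts[1][0] - pts[0][0]
--     dy = pts[1][1] - pts[0][1]
--     if (dx, dy) not in _DIRS:
--         return None
--     for i in range(1, len(pts) - 1):
--         if pts[i + 1][0] - pts[i][0] != dx or pts[i + 1][1] - pts[i][1] != dy: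
--             return None
--     return (dx, dy, len(pts))
-- ===== Notes on version B (the rewrite author's own statement) =====
-- stated objective: simpler
-- what changed: Replaces the four orientation-specific branches (row/column checks via sorted coordinate sets and range comparison, diagonal checks via constant-sum/difference plus sort-by-x scans) with one lexicographic sort followed by a single uniform-step scan: the step between the first two sorted cells must be one of the four unit directions and every consecutive pair must repeat it.
import Mathlib
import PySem

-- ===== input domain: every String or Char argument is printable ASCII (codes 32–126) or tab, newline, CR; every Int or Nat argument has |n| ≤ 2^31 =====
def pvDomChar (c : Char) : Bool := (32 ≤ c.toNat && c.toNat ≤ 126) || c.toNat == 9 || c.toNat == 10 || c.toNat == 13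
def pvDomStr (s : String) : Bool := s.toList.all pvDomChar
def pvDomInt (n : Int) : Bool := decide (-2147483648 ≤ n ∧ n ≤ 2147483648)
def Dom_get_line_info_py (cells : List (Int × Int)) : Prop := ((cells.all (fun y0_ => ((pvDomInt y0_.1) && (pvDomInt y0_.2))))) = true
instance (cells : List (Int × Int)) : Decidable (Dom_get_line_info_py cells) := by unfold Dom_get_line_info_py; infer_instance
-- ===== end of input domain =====

-- B replaces A's four orientation-specific sort-and-check branches by one lexicographic
-- sort plus a single uniform-step scan (objective: simpler; same asymptotic cost).

-- ===== PORT A =====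
-- A-side helpers: the four branch conditions of A's if-chain, one def per branch
-- (each is the literal Python condition: outer `all` && inner sorted-list check).

-- `all(y == ys[0] for y in ys) and len(xs_sorted) == length and xs_sorted == list(range(xs_sorted[0], xs_sorted[0] + length))`
def condRow (cells : List (Int × Int)) : Bool :=
  let xs := cells.map (fun p => p.1)
  let ys := cells.map (fun p => p.2)
  let length := cells.length
  (ys.all (fun y => y == PySem.List.pyGetD ys 0 0)) &&
    (let xs_sorted := PySem.List.sorted (PySem.Set.ofList xs) (fun x => x)
     (xs_sorted.length == length) &&
       (xs_sorted == PySem.List.pyRange (PySem.List.pyGetD xs_sorted 0 0)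
                       (PySem.List.pyGetD xs_sorted 0 0 + (length : Int))))

-- `all(x == xs[0] for x in xs) and len(ys_sorted) == length and ys_sorted == list(range(ys_sorted[0], ys_sorted[0] + length))`
def condCol (cells : List (Int × Int)) : Bool :=
  let xs := cells.map (fun p => p.1)
  let ys := cells.map (fun p => p.2)
  let length := cells.length
  (xs.all (fun x => x == PySem.List.pyGetD xs 0 0)) &&
    (let ys_sorted := PySem.List.sorted (PySem.Set.ofList ys) (fun y => y)
     (ys_sorted.length == length) &&
       (ys_sorted == PySem.List.pyRange (PySem.List.pyGetD ys_sorted 0 0)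
                       (PySem.List.pyGetD ys_sorted 0 0 + (length : Int))))

-- `all((x - y) == (xs[0] - ys[0]) ...) and all(points[i+1][0]-points[i][0] == 1 and points[i+1][1]-points[i][1] == 1 ...)`
def condDiag (cells : List (Int × Int)) : Bool :=
  let xs := cells.map (fun p => p.1)
  let ys := cells.map (fun p => p.2)
  let length := cells.length
  (cells.all (fun p => p.1 - p.2 == PySem.List.pyGetD xs 0 0 - PySem.List.pyGetD ys 0 0)) &&
    (let points := PySem.List.sorted cells (fun p => p.1)
     (PySem.List.pyRange 0 ((length : Int) - 1)).all (fun i =>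
       ((PySem.List.pyGetD points (i+1) (0,0)).1 - (PySem.List.pyGetD points i (0,0)).1 == 1) &&
       ((PySem.List.pyGetD points (i+1) (0,0)).2 - (PySem.List.pyGetD points i (0,0)).2 == 1)))

-- `all((x + y) == (xs[0] + ys[0]) ...) and all(... == 1 and ... == -1 ...)`
def condAnti (cells : List (Int × Int)) : Bool :=
  let xs := cells.map (fun p => p.1)
  let ys := cells.map (fun p => p.2)
  let length := cells.length
  (cells.all (fun p => p.1 + p.2 == PySem.List.pyGetD xs 0 0 + PySem.List.pyGetD ys 0 0)) &&
    (let points := PySem.List.sorted cells (fun p => p.1)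
     (PySem.List.pyRange 0 ((length : Int) - 1)).all (fun i =>
       ((PySem.List.pyGetD points (i+1) (0,0)).1 - (PySem.List.pyGetD points i (0,0)).1 == 1) &&
       ((PySem.List.pyGetD points (i+1) (0,0)).2 - (PySem.List.pyGetD points i (0,0)).2 == -1)))

def get_line_info_py (cells : List (Int × Int)) : Option (Int × Int × Int) :=
  if cells.length < 2 then none
  else if condRow cells then some (1, 0, (cells.length : Int))
  else if condCol cells then some (0, 1, (cells.length : Int))
  else if condDiag cells then some (1, 1, (cells.length : Int))
  else if condAnti cells then some (1, -1, (cells.length : Int))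
  else none

-- ===== PORT B =====
-- the set literal _DIRS, ported as its list of (distinct) elements
def pvDirs : List (Int × Int) := [(1, 0), (0, 1), (1, 1), (1, -1)]

def get_line_info_py_alt (cells : List (Int × Int)) : Option (Int × Int × Int) :=
  if cells.length < 2 then none
  else
    -- pts = sorted(cells): Python tuple comparison is lexicographic = toLex on Int × Int
    let pts := PySem.List.sorted cells (fun p => toLex p)
    let dx := (PySem.List.pyGetD pts 1 (0,0)).1 - (PySem.List.pyGetD pts 0 (0,0)).1
    let dy := (PySem.List.pyGetD pts 1 (0,0)).2 - (PySem.List.pyGetD pts 0 (0,0)).2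
    if !(pvDirs.contains (dx, dy)) then none
    else if (PySem.List.pyRange 1 ((cells.length : Int) - 1)).all (fun i =>
        ((PySem.List.pyGetD pts (i+1) (0,0)).1 - (PySem.List.pyGetD pts i (0,0)).1 == dx) &&
        ((PySem.List.pyGetD pts (i+1) (0,0)).2 - (PySem.List.pyGetD pts i (0,0)).2 == dy))
    then some (dx, dy, (cells.length : Int))
    else none

-- ===== PRECONDITION & SPEC =====
def Spec_get_line_info_py (cells : List (Int × Int)) (out : Option (Int × Int × Int)) : Prop := out = get_line_info_py_alt cells
instance (cells : List (Int × Int)) (out : Option (Int × Int × Int)) : Decidable (Spec_get_line_info_py cells out) := by unfold Spec_get_line_info_py; infer_instance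

-- ===== CLAIM (what is proved, stated in full; the proofs are below) =====
def Claim_equal_get_line_info_py : Prop := ∀ (cells : List (Int × Int)), Dom_get_line_info_py cells → Spec_get_line_info_py cells (get_line_info_py cells)

-- ===== LEMMAS AND PROOFS =====

def arith (x0 y0 dx dy : Int) (n : Nat) : List (Int × Int) :=
  (List.range n).map (fun i : Nat => (x0 + (i : Int) * dx, y0 + (i : Int) * dy))

theorem arith_length (x0 y0 dx dy : Int) (n : Nat) : (arith x0 y0 dx dy n).length = n := by
  simp [arith]

theorem arith_getElem (x0 y0 dx dy : Int) (n : Nat) (i : Nat) (h : i < (arith x0 y0 dx dy n).length) :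
    (arith x0 y0 dx dy n)[i] = (x0 + i * dx, y0 + i * dy) := by
  simp only [arith, List.getElem_map, List.getElem_range]

theorem arith_mem (x0 y0 dx dy : Int) (n : Nat) (p : Int × Int) (h : p ∈ arith x0 y0 dx dy n) :
    ∃ i : Nat, i < n ∧ p = (x0 + i * dx, y0 + i * dy) := by
  obtain ⟨i, hi, he⟩ := List.mem_map.mp h
  exact ⟨i, List.mem_range.mp hi, he.symm⟩

theorem arith_pairwise_lex (x0 y0 dx dy : Int) (n : Nat)
    (h : 0 < dx ∨ (dx = 0 ∧ 0 < dy)) :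
    (arith x0 y0 dx dy n).Pairwise (fun a b => toLex a < toLex b) := by
  rw [arith, List.pairwise_map]
  refine (List.pairwise_lt_range).imp ?_
  intro i j hij
  rw [Prod.Lex.toLex_lt_toLex]
  have hij' : (i : Int) < j := by exact_mod_cast hij
  rcases h with h | ⟨h0, h1⟩
  · left; simp only; nlinarith
  · right
    subst h0
    constructor
    · simp
    · simp only; nlinarith

theorem arith_pairwise_fst (x0 y0 dx dy : Int) (n : Nat) (h : 0 < dx) :
    (arith x0 y0 dx dy n).Pairwise (fun a b => a.1 < b.1) := by
  rw [arith, List.pairwise_map]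
  refine (List.pairwise_lt_range).imp ?_
  intro i j hij
  have hij' : (i : Int) < j := by exact_mod_cast hij
  simp only
  nlinarith

theorem eq_arith_of_deltas (L : List (Int × Int)) (hL : 0 < L.length) (dx dy : Int)
    (h : ∀ i : Nat, (hi : i + 1 < L.length) →
      (L[i+1]'hi).1 - (L[i]'(by omega)).1 = dx ∧ (L[i+1]'hi).2 - (L[i]'(by omega)).2 = dy) :
    L = arith (L[0]'hL).1 (L[0]'hL).2 dx dy L.length := by
  have key : ∀ i : Nat, (hi : i < L.length) →
      (L[i]'hi) = ((L[0]'hL).1 + i * dx, (L[0]'hL).2 + i * dy) := by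
    intro i
    induction i with
    | zero => intro hi; simp
    | succ k ih =>
      intro hi
      have h2 := ih (by omega)
      have hx := (h k hi).1
      have hy := (h k hi).2
      rw [h2] at hx hy
      have e1 : (L[k+1]'hi).1 = (L[0]'hL).1 + ((k : Int) + 1) * dx := by ring_nf; ring_nf at hx; linarith
      have e2 : (L[k+1]'hi).2 = (L[0]'hL).2 + ((k : Int) + 1) * dy := by ring_nf; ring_nf at hy; linarith
      have : ((k + 1 : Nat) : Int) = (k : Int) + 1 := by push_cast; ring
      rw [Prod.ext_iff, this]
      exact ⟨e1, e2⟩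
  apply List.ext_getElem (by rw [arith_length])
  intro i h1 h2
  rw [key i h1, arith_getElem]

theorem pyGetD_arith (x0 y0 dx dy : Int) (n : Nat) (i : Int) (h0 : 0 ≤ i) (h1 : i < n) :
    PySem.List.pyGetD (arith x0 y0 dx dy n) i (0,0) = (x0 + i * dx, y0 + i * dy) := by
  rw [PySem.List.pyGetD_eq_getElem _ _ h0 (by rw [arith_length]; exact_mod_cast h1),
      arith_getElem]
  have : ((i.toNat : Nat) : Int) = i := Int.toNat_of_nonneg h0
  rw [this]

theorem all_delta_iff (L : List (Int × Int)) (dx dy : Int) (n : Nat) (hn : L.length = n) (a : Int) (ha : 0 ≤ a) :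
    ((PySem.List.pyRange a ((n : Int) - 1)).all (fun i =>
       ((PySem.List.pyGetD L (i+1) (0,0)).1 - (PySem.List.pyGetD L i (0,0)).1 == dx) &&
       ((PySem.List.pyGetD L (i+1) (0,0)).2 - (PySem.List.pyGetD L i (0,0)).2 == dy)) = true)
    ↔ ∀ i : Nat, a ≤ (i : Int) → (hi : i + 1 < L.length) →
        (L[i+1]'hi).1 - (L[i]'(by omega)).1 = dx ∧ (L[i+1]'hi).2 - (L[i]'(by omega)).2 = dy := by
  rw [List.all_eq_true]
  constructor
  · intro H i hai hi
    have him : (i : Int) ∈ PySem.List.pyRange a ((n : Int) - 1) := by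
      rw [PySem.List.mem_pyRange_one]
      constructor
      · exact hai
      · omega
    have := H _ him
    simp only [Bool.and_eq_true, beq_iff_eq] at this
    have c1 : ((i : Int) + 1) = ((i + 1 : Nat) : Int) := by push_cast; ring
    rw [c1, PySem.List.pyGetD_natCast, PySem.List.pyGetD_natCast,
        List.getD_eq_getElem _ _ (by omega), List.getD_eq_getElem _ _ (by omega)] at this
    exact this
  · intro H i him
    rw [PySem.List.mem_pyRange_one] at him
    obtain ⟨k, rfl⟩ := Int.eq_ofNat_of_zero_le (le_trans ha him.1)
    have hk : k + 1 < L.length := by omega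
    have := H k him.1 hk
    simp only [Bool.and_eq_true, beq_iff_eq]
    have c1 : ((k : Int) + 1) = ((k + 1 : Nat) : Int) := by push_cast; ring
    rw [c1, PySem.List.pyGetD_natCast, PySem.List.pyGetD_natCast,
        List.getD_eq_getElem _ _ (by omega), List.getD_eq_getElem _ _ (by omega)]
    exact this

theorem nodup_of_ofList_length (l : List Int) (h : (PySem.Set.ofList l).length = l.length) : l.Nodup := by
  have hperm : (PySem.Set.ofList l).Perm l.dedup :=
    (List.perm_ext_iff_of_nodup (PySem.Set.nodup_ofList l) l.nodup_dedup).mpr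
      (fun a => by rw [PySem.Set.mem_ofList, List.mem_dedup])
  have hlen2 : l.dedup.length = l.length := by rw [← hperm.length_eq, h]
  have he := (List.dedup_sublist l).eq_of_length hlen2
  rw [← he]; exact l.nodup_dedup

theorem map_pyRange_fst (x0 y0 : Int) (n : Nat) :
    (PySem.List.pyRange x0 (x0 + (n : Int))).map (fun x => (x, y0)) = arith x0 y0 1 0 n := by
  rw [PySem.List.pyRange_one, List.map_map, arith]
  have h : (x0 + (n : Int) - x0).toNat = n := by omega
  rw [h]
  apply List.map_congr_left
  intro i _
  simp

theorem map_pyRange_snd (x0 y0 : Int) (n : Nat) :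
    (PySem.List.pyRange y0 (y0 + (n : Int))).map (fun y => (x0, y)) = arith x0 y0 0 1 n := by
  rw [PySem.List.pyRange_one, List.map_map, arith]
  have h : (y0 + (n : Int) - y0).toNat = n := by omega
  rw [h]
  apply List.map_congr_left
  intro i _
  simp

theorem arith_map_fst (x0 y0 : Int) (n : Nat) :
    (arith x0 y0 1 0 n).map (fun p => p.1) = PySem.List.pyRange x0 (x0 + (n : Int)) := by
  rw [← map_pyRange_fst x0 y0 n, List.map_map]
  have hid : ((fun p : Int × Int => p.1) ∘ (fun x => (x, y0))) = id := rfl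
  rw [hid, List.map_id]

theorem arith_map_snd (x0 y0 : Int) (n : Nat) :
    (arith x0 y0 0 1 n).map (fun p => p.2) = PySem.List.pyRange y0 (y0 + (n : Int)) := by
  rw [← map_pyRange_snd x0 y0 n, List.map_map]
  have hid : ((fun p : Int × Int => p.2) ∘ (fun y => (x0, y))) = id := rfl
  rw [hid, List.map_id]

theorem condRow_iff (cells : List (Int × Int)) (h2 : 2 ≤ cells.length) :
    condRow cells = true ↔ ∃ a b : Int, PySem.List.sorted cells (fun p => toLex p) = arith a b 1 0 cells.length := by
  constructor
  · intro hcond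
    simp only [condRow, Bool.and_eq_true, List.all_eq_true, beq_iff_eq] at hcond
    obtain ⟨hy, hlen, heq⟩ := hcond
    have hnd : (cells.map (fun p => p.1)).Nodup := by
      apply nodup_of_ofList_length
      have hl2 := PySem.List.length_sorted (PySem.Set.ofList (cells.map (fun p => p.1))) (fun x => x) false
      rw [← hl2, hlen, List.length_map]
    have hofl := PySem.Set.ofList_eq_self_of_nodup _ hnd
    set a0 := PySem.List.pyGetD (PySem.List.sorted (PySem.Set.ofList (cells.map (fun p => p.1))) (fun x => x)) 0 0 with ha0
    have p1 := PySem.List.sorted_perm (PySem.Set.ofList (cells.map (fun p => p.1))) (fun x => x) false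
    rw [heq, hofl] at p1
    set y0 := PySem.List.pyGetD (cells.map (fun p => p.2)) 0 0 with hy0
    have hcells : cells = (cells.map (fun p => p.1)).map (fun x => (x, y0)) := by
      rw [List.map_map]
      apply List.ext_getElem (by simp)
      intro i hi1 hi2
      simp only [List.getElem_map, Function.comp_apply]
      have hmem : cells[i].2 ∈ cells.map (fun p => p.2) :=
        List.mem_map_of_mem (List.getElem_mem hi1)
      have hb := hy _ hmem
      exact Prod.ext_iff.mpr ⟨rfl, hb⟩
    refine ⟨a0, y0, ?_⟩
    apply PySem.List.sorted_eq_of_perm_of_pairwise_lt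
    · have hm := p1.map (fun x => (x, y0))
      rw [← hcells, map_pyRange_fst] at hm
      exact hm
    · exact arith_pairwise_lex _ _ _ _ _ (Or.inl one_pos)
  · rintro ⟨a, b, hS⟩
    have hperm : (arith a b 1 0 cells.length).Perm cells := by
      rw [← hS]; exact PySem.List.sorted_perm _ _ _
    have hmem : ∀ p ∈ cells, p.2 = b := by
      intro p hp
      obtain ⟨i, hi, he⟩ := arith_mem _ _ _ _ _ _ ((hperm.mem_iff).mpr hp)
      rw [he]; simp
    simp only [condRow, Bool.and_eq_true, List.all_eq_true, beq_iff_eq]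
    have h0lt : 0 < cells.length := by omega
    have hy0 : PySem.List.pyGetD (cells.map (fun p => p.2)) 0 0 = b := by
      rw [PySem.List.pyGetD_eq_getElem _ _ le_rfl (by simp; omega)]
      simp only [Int.toNat_zero, List.getElem_map]
      exact hmem _ (List.getElem_mem (by omega))
    have hxsperm : (cells.map (fun p => p.1)).Perm (PySem.List.pyRange a (a + (cells.length : Int))) := by
      have hm := hperm.map (fun p => p.1)
      rw [arith_map_fst] at hm
      exact hm.symm
    have hnd : (cells.map (fun p => p.1)).Nodup :=
      hxsperm.symm.nodup (PySem.List.nodup_pyRange_one _ _)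
    have hS0 : PySem.List.sorted (PySem.Set.ofList (cells.map (fun p => p.1))) (fun x => x)
        = PySem.List.pyRange a (a + (cells.length : Int)) := by
      rw [PySem.Set.ofList_eq_self_of_nodup _ hnd]
      exact PySem.List.sorted_eq_of_perm_of_pairwise_lt _ _ _ hxsperm.symm
        (PySem.List.pairwise_lt_pyRange_one _ _)
    refine ⟨fun y hy => ?_, ?_, ?_⟩
    · obtain ⟨p, hp, rfl⟩ := List.mem_map.mp hy
      rw [hy0]; exact hmem p hp
    · rw [hS0, PySem.List.length_pyRange_one]; omega
    · have hx0 : PySem.List.pyGetD (PySem.List.sorted (PySem.Set.ofList (cells.map (fun p => p.1))) (fun x => x)) 0 0 = a := by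
        rw [hS0, PySem.List.pyGetD_eq_getElem _ _ le_rfl
          (by rw [PySem.List.length_pyRange_one]; push_cast; omega)]
        simp [PySem.List.getElem_pyRange_one]
      rw [hx0, hS0]

theorem condCol_iff (cells : List (Int × Int)) (h2 : 2 ≤ cells.length) :
    condCol cells = true ↔ ∃ a b : Int, PySem.List.sorted cells (fun p => toLex p) = arith a b 0 1 cells.length := by
  constructor
  · intro hcond
    simp only [condCol, Bool.and_eq_true, List.all_eq_true, beq_iff_eq] at hcond
    obtain ⟨hx, hlen, heq⟩ := hcond
    have hnd : (cells.map (fun p => p.2)).Nodup := by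
      apply nodup_of_ofList_length
      have hl2 := PySem.List.length_sorted (PySem.Set.ofList (cells.map (fun p => p.2))) (fun y => y) false
      rw [← hl2, hlen, List.length_map]
    have hofl := PySem.Set.ofList_eq_self_of_nodup _ hnd
    set b0 := PySem.List.pyGetD (PySem.List.sorted (PySem.Set.ofList (cells.map (fun p => p.2))) (fun y => y)) 0 0 with hb0
    have p1 := PySem.List.sorted_perm (PySem.Set.ofList (cells.map (fun p => p.2))) (fun y => y) false
    rw [heq, hofl] at p1
    set x0 := PySem.List.pyGetD (cells.map (fun p => p.1)) 0 0 with hx0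
    have hcells : cells = (cells.map (fun p => p.2)).map (fun y => (x0, y)) := by
      rw [List.map_map]
      apply List.ext_getElem (by simp)
      intro i hi1 hi2
      simp only [List.getElem_map, Function.comp_apply]
      have hmem : cells[i].1 ∈ cells.map (fun p => p.1) :=
        List.mem_map_of_mem (List.getElem_mem hi1)
      have hb := hx _ hmem
      exact Prod.ext_iff.mpr ⟨hb, rfl⟩
    refine ⟨x0, b0, ?_⟩
    apply PySem.List.sorted_eq_of_perm_of_pairwise_lt
    · have hm := p1.map (fun y => (x0, y))
      rw [← hcells, map_pyRange_snd] at hm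
      exact hm
    · exact arith_pairwise_lex _ _ _ _ _ (Or.inr ⟨rfl, one_pos⟩)
  · rintro ⟨a, b, hS⟩
    have hperm : (arith a b 0 1 cells.length).Perm cells := by
      rw [← hS]; exact PySem.List.sorted_perm _ _ _
    have hmem : ∀ p ∈ cells, p.1 = a := by
      intro p hp
      obtain ⟨i, hi, he⟩ := arith_mem _ _ _ _ _ _ ((hperm.mem_iff).mpr hp)
      rw [he]; simp
    simp only [condCol, Bool.and_eq_true, List.all_eq_true, beq_iff_eq]
    have h0lt : 0 < cells.length := by omega
    have hx0 : PySem.List.pyGetD (cells.map (fun p => p.1)) 0 0 = a := by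
      rw [PySem.List.pyGetD_eq_getElem _ _ le_rfl (by simp; omega)]
      simp only [Int.toNat_zero, List.getElem_map]
      exact hmem _ (List.getElem_mem (by omega))
    have hysperm : (cells.map (fun p => p.2)).Perm (PySem.List.pyRange b (b + (cells.length : Int))) := by
      have hm := hperm.map (fun p => p.2)
      rw [arith_map_snd] at hm
      exact hm.symm
    have hnd : (cells.map (fun p => p.2)).Nodup :=
      hysperm.symm.nodup (PySem.List.nodup_pyRange_one _ _)
    have hS0 : PySem.List.sorted (PySem.Set.ofList (cells.map (fun p => p.2))) (fun y => y)
        = PySem.List.pyRange b (b + (cells.length : Int)) := by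
      rw [PySem.Set.ofList_eq_self_of_nodup _ hnd]
      exact PySem.List.sorted_eq_of_perm_of_pairwise_lt _ _ _ hysperm.symm
        (PySem.List.pairwise_lt_pyRange_one _ _)
    refine ⟨fun x hxm => ?_, ?_, ?_⟩
    · obtain ⟨p, hp, rfl⟩ := List.mem_map.mp hxm
      rw [hx0]; exact hmem p hp
    · rw [hS0, PySem.List.length_pyRange_one]; omega
    · have hy0 : PySem.List.pyGetD (PySem.List.sorted (PySem.Set.ofList (cells.map (fun p => p.2))) (fun y => y)) 0 0 = b := by
        rw [hS0, PySem.List.pyGetD_eq_getElem _ _ le_rfl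
          (by rw [PySem.List.length_pyRange_one]; push_cast; omega)]
        simp [PySem.List.getElem_pyRange_one]
      rw [hy0, hS0]

theorem condDiag_iff (cells : List (Int × Int)) (h2 : 2 ≤ cells.length) :
    condDiag cells = true ↔ ∃ a b : Int, PySem.List.sorted cells (fun p => toLex p) = arith a b 1 1 cells.length := by
  constructor
  · intro hcond
    simp only [condDiag, Bool.and_eq_true] at hcond
    obtain ⟨-, hloop⟩ := hcond
    have hlen : (PySem.List.sorted cells (fun p => p.1)).length = cells.length :=
      PySem.List.length_sorted _ _ _
    have h0 : 0 < (PySem.List.sorted cells (fun p => p.1)).length := by omega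
    have hdel := (all_delta_iff (PySem.List.sorted cells (fun p => p.1)) 1 1 cells.length hlen 0 le_rfl).mp hloop
    have harith := eq_arith_of_deltas (PySem.List.sorted cells (fun p => p.1)) h0 1 1
      (fun i hi => hdel i (Int.natCast_nonneg i) hi)
    rw [hlen] at harith
    refine ⟨((PySem.List.sorted cells (fun p => p.1))[0]'h0).1,
      ((PySem.List.sorted cells (fun p => p.1))[0]'h0).2, ?_⟩
    apply PySem.List.sorted_eq_of_perm_of_pairwise_lt
    · have hp := PySem.List.sorted_perm cells (fun p => p.1) false
      rw [harith] at hp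
      exact hp
    · exact arith_pairwise_lex _ _ _ _ _ (Or.inl one_pos)
  · rintro ⟨a, b, hS⟩
    have hperm : (arith a b 1 1 cells.length).Perm cells := by
      rw [← hS]; exact PySem.List.sorted_perm _ _ _
    have hdiff : ∀ p ∈ cells, p.1 - p.2 = a - b := by
      intro p hp
      obtain ⟨i, hi, he⟩ := arith_mem _ _ _ _ _ _ ((hperm.mem_iff).mpr hp)
      rw [he]; simp
    have h0lt : 0 < cells.length := by omega
    simp only [condDiag, Bool.and_eq_true]
    constructor
    · rw [List.all_eq_true]
      intro p hp
      rw [beq_iff_eq]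
      have hx0 : PySem.List.pyGetD (cells.map (fun q => q.1)) 0 0 = (cells[0]'h0lt).1 := by
        rw [PySem.List.pyGetD_eq_getElem _ _ le_rfl (by simp; omega)]
        simp
      have hy0 : PySem.List.pyGetD (cells.map (fun q => q.2)) 0 0 = (cells[0]'h0lt).2 := by
        rw [PySem.List.pyGetD_eq_getElem _ _ le_rfl (by simp; omega)]
        simp
      rw [hx0, hy0, hdiff p hp, hdiff _ (List.getElem_mem h0lt)]
    · have hpts : PySem.List.sorted cells (fun p => p.1) = arith a b 1 1 cells.length :=
        PySem.List.sorted_eq_of_perm_of_pairwise_lt _ _ _ hperm (arith_pairwise_fst _ _ _ _ _ one_pos)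
      rw [hpts]
      apply (all_delta_iff (arith a b 1 1 cells.length) 1 1 cells.length (arith_length _ _ _ _ _) 0 le_rfl).mpr
      intro i _ hi
      rw [arith_getElem, arith_getElem]
      constructor <;> (simp; try (push_cast; ring))

theorem condAnti_iff (cells : List (Int × Int)) (h2 : 2 ≤ cells.length) :
    condAnti cells = true ↔ ∃ a b : Int, PySem.List.sorted cells (fun p => toLex p) = arith a b 1 (-1) cells.length := by
  constructor
  · intro hcond
    simp only [condAnti, Bool.and_eq_true] at hcond
    obtain ⟨-, hloop⟩ := hcond
    have hlen : (PySem.List.sorted cells (fun p => p.1)).length = cells.length :=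
      PySem.List.length_sorted _ _ _
    have h0 : 0 < (PySem.List.sorted cells (fun p => p.1)).length := by omega
    have hdel := (all_delta_iff (PySem.List.sorted cells (fun p => p.1)) 1 (-1) cells.length hlen 0 le_rfl).mp hloop
    have harith := eq_arith_of_deltas (PySem.List.sorted cells (fun p => p.1)) h0 1 (-1)
      (fun i hi => hdel i (Int.natCast_nonneg i) hi)
    rw [hlen] at harith
    refine ⟨((PySem.List.sorted cells (fun p => p.1))[0]'h0).1,
      ((PySem.List.sorted cells (fun p => p.1))[0]'h0).2, ?_⟩
    apply PySem.List.sorted_eq_of_perm_of_pairwise_lt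
    · have hp := PySem.List.sorted_perm cells (fun p => p.1) false
      rw [harith] at hp
      exact hp
    · exact arith_pairwise_lex _ _ _ _ _ (Or.inl one_pos)
  · rintro ⟨a, b, hS⟩
    have hperm : (arith a b 1 (-1) cells.length).Perm cells := by
      rw [← hS]; exact PySem.List.sorted_perm _ _ _
    have hsum : ∀ p ∈ cells, p.1 + p.2 = a + b := by
      intro p hp
      obtain ⟨i, hi, he⟩ := arith_mem _ _ _ _ _ _ ((hperm.mem_iff).mpr hp)
      rw [he]; simp; ring
    have h0lt : 0 < cells.length := by omega
    simp only [condAnti, Bool.and_eq_true]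
    constructor
    · rw [List.all_eq_true]
      intro p hp
      rw [beq_iff_eq]
      have hx0 : PySem.List.pyGetD (cells.map (fun q => q.1)) 0 0 = (cells[0]'h0lt).1 := by
        rw [PySem.List.pyGetD_eq_getElem _ _ le_rfl (by simp; omega)]
        simp
      have hy0 : PySem.List.pyGetD (cells.map (fun q => q.2)) 0 0 = (cells[0]'h0lt).2 := by
        rw [PySem.List.pyGetD_eq_getElem _ _ le_rfl (by simp; omega)]
        simp
      rw [hx0, hy0, hsum p hp, hsum _ (List.getElem_mem h0lt)]
    · have hpts : PySem.List.sorted cells (fun p => p.1) = arith a b 1 (-1) cells.length :=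
        PySem.List.sorted_eq_of_perm_of_pairwise_lt _ _ _ hperm (arith_pairwise_fst _ _ _ _ _ one_pos)
      rw [hpts]
      apply (all_delta_iff (arith a b 1 (-1) cells.length) 1 (-1) cells.length (arith_length _ _ _ _ _) 0 le_rfl).mpr
      intro i _ hi
      rw [arith_getElem, arith_getElem]
      constructor <;> (simp; try (push_cast; ring))

theorem alt_of_arith (cells : List (Int × Int)) (h2 : 2 ≤ cells.length) (a b dx dy : Int)
    (hd : (dx, dy) ∈ pvDirs)
    (hS : PySem.List.sorted cells (fun p => toLex p) = arith a b dx dy cells.length) :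
    get_line_info_py_alt cells = some (dx, dy, (cells.length : Int)) := by
  simp only [get_line_info_py_alt]
  rw [if_neg (by omega)]
  rw [hS]
  have hD1 : (PySem.List.pyGetD (arith a b dx dy cells.length) 1 (0,0)).1
      - (PySem.List.pyGetD (arith a b dx dy cells.length) 0 (0,0)).1 = dx := by
    rw [pyGetD_arith _ _ _ _ _ _ (by omega) (by push_cast; omega),
        pyGetD_arith _ _ _ _ _ _ le_rfl (by push_cast; omega)]
    simp
  have hD2 : (PySem.List.pyGetD (arith a b dx dy cells.length) 1 (0,0)).2
      - (PySem.List.pyGetD (arith a b dx dy cells.length) 0 (0,0)).2 = dy := by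
    rw [pyGetD_arith _ _ _ _ _ _ (by omega) (by push_cast; omega),
        pyGetD_arith _ _ _ _ _ _ le_rfl (by push_cast; omega)]
    simp
  rw [hD1, hD2]
  have hc : pvDirs.contains (dx, dy) = true := by
    simpa using hd
  rw [hc]
  have hall : ((PySem.List.pyRange 1 ((cells.length : Int) - 1)).all (fun i =>
      ((PySem.List.pyGetD (arith a b dx dy cells.length) (i+1) (0,0)).1 - (PySem.List.pyGetD (arith a b dx dy cells.length) i (0,0)).1 == dx) &&
      ((PySem.List.pyGetD (arith a b dx dy cells.length) (i+1) (0,0)).2 - (PySem.List.pyGetD (arith a b dx dy cells.length) i (0,0)).2 == dy))) = true := by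
    apply (all_delta_iff (arith a b dx dy cells.length) dx dy cells.length (arith_length _ _ _ _ _) 1 (by norm_num)).mpr
    intro i _ hi
    rw [arith_getElem, arith_getElem]
    constructor <;> (simp; try (push_cast; ring))
  rw [hall]
  simp

theorem arith_of_alt (cells : List (Int × Int)) (h2 : 2 ≤ cells.length) (r : Int × Int × Int)
    (h : get_line_info_py_alt cells = some r) :
    ∃ a b dx dy : Int, (dx, dy) ∈ pvDirs ∧
      PySem.List.sorted cells (fun p => toLex p) = arith a b dx dy cells.length ∧
      r = (dx, dy, (cells.length : Int)) := by
  simp only [get_line_info_py_alt] at h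
  rw [if_neg (by omega)] at h
  set pts := PySem.List.sorted cells (fun p => toLex p) with hpts
  have hlen : pts.length = cells.length := PySem.List.length_sorted _ _ _
  set dx := (PySem.List.pyGetD pts 1 (0,0)).1 - (PySem.List.pyGetD pts 0 (0,0)).1 with hdx
  set dy := (PySem.List.pyGetD pts 1 (0,0)).2 - (PySem.List.pyGetD pts 0 (0,0)).2 with hdy
  by_cases hc : pvDirs.contains (dx, dy) = true
  · rw [hc] at h
    simp only [Bool.not_true] at h
    rw [if_neg (by simp)] at h
    by_cases hall : ((PySem.List.pyRange 1 ((cells.length : Int) - 1)).all (fun i =>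
        ((PySem.List.pyGetD pts (i+1) (0,0)).1 - (PySem.List.pyGetD pts i (0,0)).1 == dx) &&
        ((PySem.List.pyGetD pts (i+1) (0,0)).2 - (PySem.List.pyGetD pts i (0,0)).2 == dy))) = true
    · rw [if_pos hall] at h
      have hdel := (all_delta_iff pts dx dy cells.length hlen 1 (by norm_num)).mp hall
      have h1lt : (1 : Int) < (pts.length : Int) := by push_cast; omega
      have hg1 : PySem.List.pyGetD pts 1 (0,0) = pts[1]'(by omega) := by
        rw [PySem.List.pyGetD_eq_getElem _ _ (by norm_num) (by exact_mod_cast h1lt)]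
        simp
      have hg0 : PySem.List.pyGetD pts 0 (0,0) = pts[0]'(by omega) := by
        rw [PySem.List.pyGetD_eq_getElem _ _ le_rfl (by push_cast; omega)]
        simp
      have hfull : ∀ i : Nat, (hi : i + 1 < pts.length) →
          (pts[i+1]'hi).1 - (pts[i]'(by omega)).1 = dx ∧ (pts[i+1]'hi).2 - (pts[i]'(by omega)).2 = dy := by
        intro i hi
        rcases Nat.eq_zero_or_pos i with rfl | hip
        · constructor
          · rw [hdx, hg1, hg0]
          · rw [hdy, hg1, hg0]
        · exact hdel i (by exact_mod_cast hip) hi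
      have h0pts : 0 < pts.length := by omega
      set p0 := pts[0]'h0pts with hp0
      have harith := eq_arith_of_deltas pts h0pts dx dy hfull
      rw [← hp0, hlen] at harith
      refine ⟨p0.1, p0.2, dx, dy, by simpa using hc, harith, ?_⟩
      exact (Option.some_injective _ h).symm
    · rw [if_neg hall] at h
      exact absurd h (by simp)
  · have hfalse : pvDirs.contains (dx, dy) = false := Bool.eq_false_iff.mpr hc
    rw [hfalse] at h
    simp at h

-- ===== VERDICT (by name: the statement is the Claim_ definition above) =====
theorem get_line_info_py_spec : Claim_equal_get_line_info_py := by
  intro cells _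
  unfold Spec_get_line_info_py
  by_cases hlt : cells.length < 2
  · simp [get_line_info_py, get_line_info_py_alt, hlt]
  · have h2 : 2 ≤ cells.length := by omega
    by_cases hR : condRow cells = true
    · obtain ⟨a, b, hS⟩ := (condRow_iff cells h2).mp hR
      rw [alt_of_arith cells h2 a b 1 0 (by simp [pvDirs]) hS]
      simp [get_line_info_py, hlt, hR]
    · by_cases hC : condCol cells = true
      · obtain ⟨a, b, hS⟩ := (condCol_iff cells h2).mp hC
        rw [alt_of_arith cells h2 a b 0 1 (by simp [pvDirs]) hS]
        simp [get_line_info_py, hlt, hR, hC]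
      · by_cases hD : condDiag cells = true
        · obtain ⟨a, b, hS⟩ := (condDiag_iff cells h2).mp hD
          rw [alt_of_arith cells h2 a b 1 1 (by simp [pvDirs]) hS]
          simp [get_line_info_py, hlt, hR, hC, hD]
        · by_cases hA : condAnti cells = true
          · obtain ⟨a, b, hS⟩ := (condAnti_iff cells h2).mp hA
            rw [alt_of_arith cells h2 a b 1 (-1) (by simp [pvDirs]) hS]
            simp [get_line_info_py, hlt, hR, hC, hD, hA]
          · have hA' : get_line_info_py cells = none := by
              simp [get_line_info_py, hlt, hR, hC, hD, hA]
            rw [hA']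
            rcases hB : get_line_info_py_alt cells with _ | r
            · rfl
            · exfalso
              obtain ⟨a, b, dx, dy, hd, hS, -⟩ := arith_of_alt cells h2 r hB
              simp only [pvDirs, List.mem_cons, List.mem_singleton, Prod.mk.injEq] at hd
              rcases hd with ⟨e1, e2⟩ | ⟨e1, e2⟩ | ⟨e1, e2⟩ | ⟨e1, e2⟩ | h
              · exact hR ((condRow_iff cells h2).mpr ⟨a, b, by rw [hS, e1, e2]⟩)
              · exact hC ((condCol_iff cells h2).mpr ⟨a, b, by rw [hS, e1, e2]⟩)
              · exact hD ((condDiag_iff cells h2).mpr ⟨a, b, by rw [hS, e1, e2]⟩)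
              · exact hA ((condAnti_iff cells h2).mpr ⟨a, b, by rw [hS, e1, e2]⟩)
              · simp at h
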